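-- pv_equiv track=rewrite | github.com/09rd193/eca_search | eca_search.py | inititem
-- ===== SOURCE A (Python) =====
-- import math
--
-- def inititem(target):
--   digit = int(math.log2(target))
--   intitem = 2 ** digit
--   stritem = format(intitem, 'b')
--   _stritem = '1'
--   while len(_stritem) <= len(stritem):
--     _stritem = _stritem + '0' * len(_stritem)
--   stritem = _stritem[:int(-len(_stritem) / 2)]
--   return stritem
-- ===== SOURCE B (Python) =====
-- def inititem(target):
--     L = target.bit_length()  # = int(math.log2(target)) + 1 for target >= 1
--     return '1' + '0' * ((1 << (L.bit_length() - 1)) - 1)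
-- ===== Notes on version B (the rewrite author's own statement) =====
-- stated objective: simpler
-- what changed: Replaces the binary-format string, the string-doubling while-loop and the negative slice by a closed form: the answer is '1' followed by 2^(bit_length(bit_length(target))-1)-1 zeros.
import Mathlib
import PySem

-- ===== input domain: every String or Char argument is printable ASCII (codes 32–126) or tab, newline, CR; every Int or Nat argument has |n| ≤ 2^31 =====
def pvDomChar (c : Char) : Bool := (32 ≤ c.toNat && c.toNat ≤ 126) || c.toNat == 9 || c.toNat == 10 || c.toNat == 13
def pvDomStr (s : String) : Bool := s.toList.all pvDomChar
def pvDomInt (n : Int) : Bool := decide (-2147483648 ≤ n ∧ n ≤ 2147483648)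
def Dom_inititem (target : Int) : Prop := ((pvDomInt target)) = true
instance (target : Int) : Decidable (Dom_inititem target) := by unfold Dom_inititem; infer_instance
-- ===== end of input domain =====

-- B replaces A's binary-format string, string-doubling loop and negative slice by a
-- closed form built from integer bit lengths (objective: simpler).


-- ===== PORT A =====
-- hand port of format(n, 'b') (no PySem primitive): binary digits, most significant first
def pyBinDigits (n : Nat) : List Char :=
  if h : n = 0 then []
  else pyBinDigits (n / 2) ++ [if n % 2 == 1 then '1' else '0']
decreasing_by exact Nat.div_lt_self (Nat.pos_of_ne_zero h) (by norm_num)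

def pyFormatB (n : Nat) : List Char :=
  if n = 0 then ['0'] else pyBinDigits n

-- the while-loop of A; fuel is only a totality guard (proved sufficient below)
def aLoop : Nat → Nat → List Char → List Char
  | 0, _, s => s
  | fuel + 1, L, s =>
      if s.length ≤ L then aLoop fuel L (s ++ List.replicate s.length '0') else s

def inititem (target : Int) : String :=
  -- int(math.log2(target)): hand port; exact for 1 ≤ target ≤ 2^31 (double log2 is
  -- correctly rounded there, so truncation gives the floor of log2)
  let digit : Nat := Nat.log2 target.toNat
  let intitem : Nat := 2 ^ digit
  let stritem : List Char := pyFormatB intitem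
  let s : List Char := aLoop (stritem.length + 1) stritem.length ['1']
  -- _stritem[:int(-len(_stritem) / 2)] : len is even here, so int(-len/2) = -(len/2)
  String.mk (PySem.List.slice s none (some (-(((s.length / 2 : Nat)) : Int))))

-- ===== PORT B =====
-- hand port of int.bit_length (no PySem primitive): exact for all n
def blen : Nat → Nat
  | 0 => 0
  | n + 1 => blen ((n + 1) / 2) + 1

def inititem_alt (target : Int) : String :=
  let L : Nat := blen target.natAbs  -- target.bit_length()
  String.mk ('1' :: List.replicate ((1 <<< (blen L - 1)) - 1) '0')

-- ===== PRECONDITION & SPEC =====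
-- Pre_ excludes exactly target ≤ 0, where math.log2 raises ValueError in A
def Pre_inititem (target : Int) : Prop := 1 ≤ target
instance (target : Int) : Decidable (Pre_inititem target) := by unfold Pre_inititem; infer_instance
def pvWitness_inititem : Int := (5)

def Spec_inititem (target : Int) (out : String) : Prop := out = inititem_alt target
instance (target : Int) (out : String) : Decidable (Spec_inititem target out) := by unfold Spec_inititem; infer_instance

-- ===== CLAIM (what is proved, stated in full; the proofs are below) =====
def Claim_equal_inititem : Prop := ∀ (target : Int), Dom_inititem target → Pre_inititem target → Spec_inititem target (inititem target)

-- ===== LEMMAS AND PROOFS =====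

theorem blen_lt (n : Nat) : n < 2 ^ blen n := by
  induction n using Nat.strong_induction_on with
  | _ n ih =>
    match n with
    | 0 => simp [blen]
    | n + 1 =>
      have h := ih ((n + 1) / 2) (by omega)
      have hb : blen (n + 1) = blen ((n + 1) / 2) + 1 := by simp [blen]
      rw [hb, pow_succ]
      omega

theorem blen_le (n k : Nat) (h : n < 2 ^ k) : blen n ≤ k := by
  induction n using Nat.strong_induction_on generalizing k with
  | _ n ih =>
    match n with
    | 0 => simp [blen]
    | n + 1 =>
      have hk : k ≠ 0 := by rintro rfl; simp at h
      obtain ⟨k, rfl⟩ := Nat.exists_eq_succ_of_ne_zero hk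
      have h2 : (n + 1) / 2 < 2 ^ k := by
        have : (2:Nat) ^ (k+1) = 2 ^ k * 2 := pow_succ 2 k
        omega
      have := ih ((n + 1) / 2) (by omega) k h2
      simp only [blen]; omega

theorem lt_blen (n k : Nat) (h : 2 ^ k ≤ n) : k < blen n := by
  by_contra hc
  push_neg at hc
  have := blen_lt n
  have : (2:Nat) ^ blen n ≤ 2 ^ k := Nat.pow_le_pow_right (by norm_num) hc
  omega

theorem blen_eq_log2 (n : Nat) (h : 1 ≤ n) : blen n = Nat.log2 n + 1 := by
  have h0 : n ≠ 0 := by omega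
  apply le_antisymm
  · exact blen_le n _ ((Nat.log2_lt h0).mp (Nat.lt_succ_self _))
  · exact lt_blen n _ (Nat.log2_self_le h0)

theorem pyBinDigits_pow (d : Nat) : pyBinDigits (2 ^ d) = '1' :: List.replicate d '0' := by
  induction d with
  | zero =>
    rw [pyBinDigits]; norm_num
    rw [pyBinDigits]; norm_num
  | succ d ih =>
    rw [pyBinDigits]
    have h1 : (2:Nat) ^ (d + 1) ≠ 0 := by positivity
    have h2 : (2:Nat) ^ (d + 1) / 2 = 2 ^ d := by
      rw [pow_succ]; exact Nat.mul_div_cancel _ (by norm_num)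
    have h3 : (2:Nat) ^ (d + 1) % 2 = 0 := by
      rw [pow_succ]; exact Nat.mul_mod_left _ _
    simp [h1, h2, h3, ih, List.replicate_succ']

-- s = '1' followed by 2^k - 1 zeros, the loop invariant shape
def onezeros (k : Nat) : List Char := '1' :: List.replicate (2 ^ k - 1) '0'

theorem onezeros_length (k : Nat) : (onezeros k).length = 2 ^ k := by
  have := Nat.one_le_two_pow (n := k)
  simp [onezeros]; omega

theorem onezeros_step (k : Nat) :
    onezeros k ++ List.replicate (onezeros k).length '0' = onezeros (k + 1) := by
  rw [onezeros_length]
  have h1 : (2:Nat) ^ k ≥ 1 := Nat.one_le_two_pow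
  have h2 : (2:Nat) ^ (k + 1) = 2 ^ k * 2 := pow_succ 2 k
  simp only [onezeros, List.cons_append, List.cons.injEq, true_and]
  rw [← List.replicate_add]
  congr 1
  omega

theorem aLoop_spec (fuel : Nat) : ∀ (k L : Nat), k ≤ blen L → blen L ≤ k + fuel →
    aLoop fuel L (onezeros k) = onezeros (blen L) := by
  induction fuel with
  | zero =>
    intro k L h1 h2
    have : k = blen L := by omega
    simp [aLoop, this]
  | succ fuel ih =>
    intro k L h1 h2
    by_cases h : 2 ^ k ≤ L
    · have hk : k < blen L := lt_blen L k h
      rw [aLoop, if_pos (by rw [onezeros_length]; exact h), onezeros_step]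
      exact ih (k + 1) L (by omega) (by omega)
    · have hk : blen L ≤ k := blen_le L k (by omega)
      have : k = blen L := by omega
      rw [aLoop, if_neg (by rw [onezeros_length]; omega), this]

theorem take_half_onezeros (m : Nat) (h : 1 ≤ m) :
    List.take (2 ^ m - 2 ^ m / 2) (onezeros m) = onezeros (m - 1) := by
  obtain ⟨p, rfl⟩ : ∃ p, m = p + 1 := ⟨m - 1, by omega⟩
  have h1 : (2:Nat) ^ (p + 1) = 2 ^ p * 2 := pow_succ 2 p
  have h2 : (2:Nat) ^ p ≥ 1 := Nat.one_le_two_pow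
  have h3 : (2:Nat) ^ (p + 1) - 2 ^ (p + 1) / 2 = 2 ^ p := by omega
  rw [h3]
  obtain ⟨q, hq⟩ : ∃ q, 2 ^ p = q + 1 := ⟨2 ^ p - 1, by omega⟩
  simp only [onezeros, hq, List.take_cons, List.take_replicate]
  congr 2
  simp; omega

-- ===== VERDICT (by name: the statement is the Claim_ definition above) =====
theorem inititem_spec : Claim_equal_inititem := by
  intro target _ hpre
  unfold Spec_inititem inititem inititem_alt
  have ht : 1 ≤ target.toNat := by unfold Pre_inititem at hpre; omega
  have habs : target.natAbs = target.toNat := by omega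
  set t := target.toNat with htdef
  set d := Nat.log2 t with hd
  have hfmt : pyFormatB (2 ^ d) = '1' :: List.replicate d '0' := by
    rw [pyFormatB, if_neg (by positivity), pyBinDigits_pow]
  have hlen : (pyFormatB (2 ^ d)).length = d + 1 := by rw [hfmt]; simp
  have hblent : blen t = d + 1 := blen_eq_log2 t ht
  set m := blen (d + 1) with hm
  have hm1 : 1 ≤ m := lt_blen (d + 1) 0 (by simpa using Nat.one_le_iff_ne_zero.mpr (by omega))
  have hml : m ≤ d + 2 := by
    have : d + 1 < 2 ^ (d + 2) := by
      have := Nat.lt_two_pow_self (n := d + 1)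
      have : (2:Nat) ^ (d + 1) ≤ 2 ^ (d + 2) := Nat.pow_le_pow_right (by norm_num) (by omega)
      omega
    exact blen_le _ _ this
  have hone : (['1'] : List Char) = onezeros 0 := by simp [onezeros]
  have hloop : aLoop ((pyFormatB (2 ^ d)).length + 1) (pyFormatB (2 ^ d)).length ['1']
      = onezeros m := by
    rw [hlen, hone]
    exact aLoop_spec (d + 2) 0 (d + 1) (Nat.zero_le _) (by omega)
  simp only [hloop, habs, hblent]
  have hlen2 : (onezeros m).length = 2 ^ m := onezeros_length m
  have hpos : 0 < (onezeros m).length / 2 := by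
    rw [hlen2]
    have : (2:Nat) ^ m ≥ 2 ^ 1 := Nat.pow_le_pow_right (by norm_num) hm1
    omega
  rw [PySem.List.slice_to_neg_natCast _ _ hpos, hlen2]
  rw [take_half_onezeros m hm1]
  rw [Nat.one_shiftLeft, ← hm]
  rfl
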